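-- pv_equiv track=rewrite | github.com/Leonard1403/University | Labs-SOLVED/Laborator 5/main.py | cheltuieli_rapoarte_zisumax
-- ===== SOURCE A (Python) =====
-- def get_ziua_cheltuiala(cheltuieli):
--     return cheltuieli[0]
--
-- def get_suma_cheltuiala(cheltuieli):
--     return cheltuieli[1]
--
-- def cheltuieli_rapoarte_zisumax(cheltuieli):
--     """
--     Functia care determina suma maxima pentru o zi oferita
--     :param cheltuieli: lista
--     :return: Se returneaza ziua in care a fost suma maxima
--     """
--     sum_max = 0
--     ziulica = 0
--     for curent_cheltuieli in cheltuieli: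
--         if int(get_suma_cheltuiala(curent_cheltuieli)) > int(sum_max):
--             sum_max = int(get_suma_cheltuiala(curent_cheltuieli))
--             ziulica = get_ziua_cheltuiala(curent_cheltuieli)
--     return ziulica
-- ===== SOURCE B (Python) =====
-- def get_ziua_cheltuiala(cheltuieli):
--     return cheltuieli[0]
--
-- def get_suma_cheltuiala(cheltuieli):
--     return cheltuieli[1]
--
-- def cheltuieli_rapoarte_zisumax(cheltuieli):
--     candidates = [c for c in cheltuieli if int(get_suma_cheltuiala(c)) > 0]
--     if not candidates:
--         return 0
--     best = max(candidates, key=lambda c: int(get_suma_cheltuiala(c)))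
--     return get_ziua_cheltuiala(best)
-- ===== Notes on version B (the rewrite author's own statement) =====
-- stated objective: idiomatic
-- what changed: Replaces A's single accumulating scan with running sum_max/ziulica state by a filter of the positive-sum entries followed by a max-with-key reduction; max's first-wins tie rule reproduces A's strict-greater first-occurrence choice and the >0 filter reproduces the sum_max=0 start and the 0 default.
import Mathlib
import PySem

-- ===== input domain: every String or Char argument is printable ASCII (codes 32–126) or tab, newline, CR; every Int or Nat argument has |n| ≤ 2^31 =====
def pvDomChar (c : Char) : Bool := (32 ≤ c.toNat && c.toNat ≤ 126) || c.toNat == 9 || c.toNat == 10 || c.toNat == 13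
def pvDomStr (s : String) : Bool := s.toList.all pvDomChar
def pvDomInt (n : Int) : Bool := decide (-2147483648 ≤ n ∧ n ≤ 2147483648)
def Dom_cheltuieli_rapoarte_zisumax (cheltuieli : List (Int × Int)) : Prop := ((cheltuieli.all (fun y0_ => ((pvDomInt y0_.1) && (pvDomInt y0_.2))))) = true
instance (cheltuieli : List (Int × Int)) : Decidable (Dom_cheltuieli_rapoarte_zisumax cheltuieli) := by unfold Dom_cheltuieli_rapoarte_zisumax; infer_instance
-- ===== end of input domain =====

-- B replaces A's single accumulating scan (running sum_max/ziulica) by a filter of the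
-- positive-sum entries followed by a max-with-key reduction (idiomatic; same O(n) cost).


-- ===== PORT A =====
def get_ziua_cheltuiala (c : Int × Int) : Int := c.1

def get_suma_cheltuiala (c : Int × Int) : Int := c.2

-- state = (sum_max, ziulica); int(...) is the identity on ints
def cheltuieli_rapoarte_zisumax (cheltuieli : List (Int × Int)) : Int :=
  (cheltuieli.foldl
    (fun st c =>
      if get_suma_cheltuiala c > st.1 then (get_suma_cheltuiala c, get_ziua_cheltuiala c)
      else st)
    ((0 : Int), (0 : Int))).2

-- ===== PORT B =====
def cheltuieli_rapoarte_zisumax_alt (cheltuieli : List (Int × Int)) : Int :=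
  let candidates := cheltuieli.filter (fun c => get_suma_cheltuiala c > 0)
  match PySem.List.max? candidates (fun c => get_suma_cheltuiala c) with
  | none => 0
  | some best => get_ziua_cheltuiala best

-- ===== PRECONDITION & SPEC =====
def Spec_cheltuieli_rapoarte_zisumax (cheltuieli : List (Int × Int)) (out : Int) : Prop := out = cheltuieli_rapoarte_zisumax_alt cheltuieli
instance (cheltuieli : List (Int × Int)) (out : Int) : Decidable (Spec_cheltuieli_rapoarte_zisumax cheltuieli out) := by unfold Spec_cheltuieli_rapoarte_zisumax; infer_instance

-- ===== CLAIM (what is proved, stated in full; the proofs are below) =====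
def Claim_equal_cheltuieli_rapoarte_zisumax : Prop := ∀ (cheltuieli : List (Int × Int)), Dom_cheltuieli_rapoarte_zisumax cheltuieli → Spec_cheltuieli_rapoarte_zisumax cheltuieli (cheltuieli_rapoarte_zisumax cheltuieli)

-- ===== LEMMAS AND PROOFS =====

-- absorbing one element into max?'s running first-maximum
lemma max?_cons_cons (p x : Int × Int) (l : List (Int × Int)) :
    PySem.List.max? (p :: x :: l) (fun c => c.2)
      = PySem.List.max? ((if p.2 < x.2 then x else p) :: l) (fun c => c.2) := by
  simp only [PySem.List.max?, List.foldl_cons, apply_ite]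

-- A's loop from any nonnegative running maximum p.2 (with day p.1) computes exactly the
-- first maximum (by sum) of p followed by the positive-filtered tail.
lemma foldA_eq_foldM (xs : List (Int × Int)) : ∀ (p : Int × Int), 0 ≤ p.2 →
    PySem.List.max? (p :: xs.filter (fun c => c.2 > 0)) (fun c => c.2)
    = some (((xs.foldl
        (fun st c => if c.2 > st.1 then (c.2, c.1) else st) (p.2, p.1)).2),
        ((xs.foldl
        (fun st c => if c.2 > st.1 then (c.2, c.1) else st) (p.2, p.1)).1)) := by
  induction xs with
  | nil => intro p _; simp [PySem.List.max?]
  | cons c xs ih =>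
    intro p hp
    simp only [List.filter_cons, List.foldl_cons, gt_iff_lt]
    by_cases h0 : 0 < c.2
    · simp only [h0, decide_true, if_true]
      rw [max?_cons_cons]
      by_cases h : p.2 < c.2
      · rw [if_pos h, if_pos h]
        simpa [gt_iff_lt] using ih c (le_of_lt h0)
      · rw [if_neg h, if_neg h]
        simpa [gt_iff_lt, Prod.mk.eta] using ih p hp
    · have hle : ¬ p.2 < c.2 := by omega
      simp only [h0, decide_false, if_neg hle]
      simpa [gt_iff_lt, Prod.mk.eta] using ih p hp

-- the full loop, starting from the empty running maximum / state (0, 0): the ports agree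
lemma ports_eq (xs : List (Int × Int)) :
    cheltuieli_rapoarte_zisumax xs = cheltuieli_rapoarte_zisumax_alt xs := by
  unfold cheltuieli_rapoarte_zisumax cheltuieli_rapoarte_zisumax_alt
  simp only [get_suma_cheltuiala, get_ziua_cheltuiala]
  induction xs with
  | nil => simp [PySem.List.max?]
  | cons c xs ih =>
    by_cases h0 : 0 < c.2
    · have H := foldA_eq_foldM xs c (le_of_lt h0)
      simp only [gt_iff_lt] at H
      simp only [List.filter_cons, List.foldl_cons, gt_iff_lt, h0, decide_true, if_true]
      rw [H]
    · simp only [List.filter_cons, List.foldl_cons, gt_iff_lt, h0, decide_false,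
        if_false] at ih ⊢
      exact ih

-- ===== VERDICT (by name: the statement is the Claim_ definition above) =====
theorem cheltuieli_rapoarte_zisumax_spec : Claim_equal_cheltuieli_rapoarte_zisumax := by
  intro xs _
  exact ports_eq xs
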